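-- pv_equiv track=rewrite | github.com/EperLuo/CellTempo | src/utils/utils_metrics.py | match_pattern_with_free_tail
-- ===== SOURCE A (Python) =====
-- def match_pattern_with_free_tail(traj, pattern):
--     """
--     Requirements:
--     - The trajectory prefix must match the segmented pattern:
--         pattern = [A, B, C]
--         valid prefix: A* B* C* (each segment must appear at least once)
--     - No cell type outside the pattern is allowed in the prefix region
--     - After the pattern is fully matched, the tail can be anything
--     - All types in the pattern must appear (each at least once) in the correct order
--     """
--     if not pattern:
--         return False
--
--     order = {p: i for i, p in enumerate(pattern)}
--     seen = [False] * len(pattern)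
--     p_idx = 0  # currently in segment pattern[p_idx]
--
--     for cell in traj:
--         if cell not in order:
--             # foreign cell type encountered before the pattern is fully matched
--             if all(seen):
--                 # pattern fully matched; tail can be anything
--                 return True
--             else:
--                 return False
--
--         idx = order[cell]
--
--         # backtracking is forbidden, e.g. for pattern = [HSC, MPP]
--         # HSC appearing again after MPP (while still within the pattern region) is invalid
--         if idx < p_idx:
--             return False
--
--         # attempt to advance to the next segment
--         if idx > p_idx:
--             # must advance exactly one step; skipping is not allowed (e.g. A -> C)
--             if idx == p_idx + 1:
--                 p_idx = idx
--             else: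
--                 return False
--
--         # mark this pattern element as seen
--         seen[idx] = True
--
--         # if all pattern elements have appeared at least once,
--         # the pattern is fully matched; return True immediately
--         if all(seen):
--             return True
--
--     # full trajectory exhausted without matching all pattern elements → no match
--     return False
-- ===== SOURCE B (Python) =====
-- def match_pattern_with_free_tail(traj, pattern):
--     # Different decomposition: collapse the trajectory into maximal runs of
--     # equal cells, then a single positional comparison: the first len(pattern)
--     # run cells must map (via last-occurrence index) to 0,1,...,len(pattern)-1.
--     if not pattern:
--         return False
--     order = {p: i for i, p in enumerate(pattern)}
--     expected = 0
--     prev = None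
--     for cell in traj:
--         if prev is not None and cell == prev:
--             continue  # same run as before
--         prev = cell
--         if order.get(cell, -1) != expected:
--             return False
--         expected += 1
--         if expected == len(pattern):
--             return True
--     return False
-- ===== Notes on version B (the rewrite author's own statement) =====
-- stated objective: simpler
-- what changed: Replaces the seen-array/all() state machine with backtrack and skip branches by a run-compression walk: adjacent equal cells are collapsed and each new run's last-occurrence index must equal a single incrementing counter.
import Mathlib
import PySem

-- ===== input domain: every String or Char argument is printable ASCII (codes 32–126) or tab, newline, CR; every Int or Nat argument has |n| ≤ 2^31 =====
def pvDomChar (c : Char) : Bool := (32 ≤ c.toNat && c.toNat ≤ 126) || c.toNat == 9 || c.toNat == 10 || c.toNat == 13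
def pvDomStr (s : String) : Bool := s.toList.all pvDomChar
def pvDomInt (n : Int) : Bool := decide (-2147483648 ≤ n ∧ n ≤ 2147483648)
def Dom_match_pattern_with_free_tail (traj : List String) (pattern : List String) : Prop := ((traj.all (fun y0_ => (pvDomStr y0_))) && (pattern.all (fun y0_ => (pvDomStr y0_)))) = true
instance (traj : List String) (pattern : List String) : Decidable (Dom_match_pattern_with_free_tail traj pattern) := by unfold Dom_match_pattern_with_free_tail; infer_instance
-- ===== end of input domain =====

-- B replaces A's seen-array state machine by a run-compression walk with one counter (simpler; same results).

-- ===== PORT A =====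
-- order = {p: i for i, p in enumerate(pattern)}  (last occurrence wins, as in Python dict comprehension)
def pvOrder (pattern : List String) : PySem.Dict String Int :=
  (PySem.List.enumerate pattern).foldl (fun d ip => PySem.Dict.insert d ip.2 ip.1) PySem.Dict.empty

-- A's for-loop with early returns, state (p_idx, seen).  seen[idx] = True is ported via
-- idx.toNat, exact here because the dict's values are the nonnegative enumerate indices.
def pvA_loop (order : PySem.Dict String Int) (traj : List String) (pIdx : Int) (seen : List Bool) : Bool :=
  match traj with
  | [] => false
  | c :: t =>
    match PySem.Dict.get? order c with
    | none => seen.all id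
    | some idx =>
      if idx < pIdx then false
      else if idx > pIdx ∧ idx ≠ pIdx + 1 then false
      else
        let pIdx' := if idx > pIdx then idx else pIdx
        let seen' := seen.set idx.toNat true
        if seen'.all id then true else pvA_loop order t pIdx' seen'

def match_pattern_with_free_tail (traj : List String) (pattern : List String) : Bool :=
  if pattern = [] then false
  else pvA_loop (pvOrder pattern) traj 0 (List.replicate pattern.length false)

-- ===== PORT B =====
-- B's for-loop: skip cells equal to prev (same run), compare order.get(cell,-1) with expected.
def pvB_loop (order : PySem.Dict String Int) (n : Int) (traj : List String)
    (prev : Option String) (expected : Int) : Bool :=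
  match traj with
  | [] => false
  | c :: t =>
    if prev = some c then pvB_loop order n t prev expected
    else if PySem.Dict.getD order c (-1) ≠ expected then false
    else if expected + 1 = n then true
    else pvB_loop order n t (some c) (expected + 1)

def match_pattern_with_free_tail_alt (traj : List String) (pattern : List String) : Bool :=
  if pattern = [] then false
  else pvB_loop (pvOrder pattern) (pattern.length : Int) traj none 0

-- ===== PRECONDITION & SPEC =====
def Spec_match_pattern_with_free_tail (traj : List String) (pattern : List String) (out : Bool) : Prop := out = match_pattern_with_free_tail_alt traj pattern
instance (traj : List String) (pattern : List String) (out : Bool) : Decidable (Spec_match_pattern_with_free_tail traj pattern out) := by unfold Spec_match_pattern_with_free_tail; infer_instance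

-- ===== CLAIM (what is proved, stated in full; the proofs are below) =====
def Claim_equal_match_pattern_with_free_tail : Prop := ∀ (traj : List String) (pattern : List String), Dom_match_pattern_with_free_tail traj pattern → Spec_match_pattern_with_free_tail traj pattern (match_pattern_with_free_tail traj pattern)

-- ===== LEMMAS AND PROOFS =====

-- characterisation of the order dict: a stored value is an in-range index of its key
theorem pvOrder_char_aux (l : List String) (s : Int) (d : PySem.Dict String Int) (c : String) (i : Int)
    (h : PySem.Dict.get? ((PySem.List.enumerate l s).foldl (fun d ip => PySem.Dict.insert d ip.2 ip.1) d) c = some i) :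
    PySem.Dict.get? d c = some i ∨ ∃ j : Nat, j < l.length ∧ i = s + (j : Int) ∧ l[j]? = some c := by
  induction l generalizing s d with
  | nil => simp [PySem.List.enumerate] at h; exact Or.inl h
  | cons x xs ih =>
    rw [PySem.List.enumerate_cons] at h
    simp only [List.foldl_cons] at h
    rcases ih (s+1) (PySem.Dict.insert d x s) h with h1 | ⟨j, hj, hi, hc⟩
    · rw [PySem.Dict.get?_insert] at h1
      by_cases hx : c = x
      · rw [if_pos hx] at h1
        simp only [Option.some.injEq] at h1
        exact Or.inr ⟨0, by simp, by omega, by simp [hx]⟩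
      · rw [if_neg hx] at h1
        exact Or.inl h1
    · exact Or.inr ⟨j+1, by simpa using hj, by push_cast; omega, by simpa using hc⟩

theorem pvOrder_char (pattern : List String) (c : String) (i : Int)
    (h : PySem.Dict.get? (pvOrder pattern) c = some i) :
    ∃ j : Nat, j < pattern.length ∧ i = (j : Int) ∧ pattern[j]? = some c := by
  rcases pvOrder_char_aux pattern 0 PySem.Dict.empty c i h with h1 | ⟨j, hj, hi, hc⟩
  · simp [PySem.Dict.get?_empty] at h1
  · exact ⟨j, hj, by omega, hc⟩

-- the seen array reachable in A: true exactly below k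
def pvSeenR (n k : Nat) : List Bool := (List.range n).map (fun i => decide (i < k))

theorem pvSeenR_zero (n : Nat) : List.replicate n false = pvSeenR n 0 := by
  simp [pvSeenR]

theorem pvSeenR_set_lt (n k j : Nat) (h : j < k) : (pvSeenR n k).set j true = pvSeenR n k := by
  apply List.ext_getElem <;> simp [pvSeenR, List.getElem_set]
  intro i hi
  by_cases hj : j = i
  · subst hj; simp; omega
  · simp [hj]

theorem pvSeenR_set_self (n k : Nat) : (pvSeenR n k).set k true = pvSeenR n (k + 1) := by
  apply List.ext_getElem <;> simp [pvSeenR, List.getElem_set]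
  intro i hi
  by_cases hk : k = i
  · simp [hk]
  · simp only [hk, decide_false, Bool.false_or, decide_eq_decide]
    omega

theorem pvSeenR_all (n k : Nat) : (pvSeenR n k).all id = decide (n ≤ k) := by
  by_cases h : n ≤ k
  · simp only [decide_eq_true h]
    simp [pvSeenR, List.all_eq_true]; omega
  · simp only [decide_eq_false_iff_not.mpr h]
    simp [pvSeenR]
    exact ⟨k, by omega, by omega⟩

-- a list whose head is false is not all-true
theorem pvAll_false (seen : List Bool) (h : seen[0]? = some false) : seen.all id = false := by
  cases seen with
  | nil => simp at h
  | cons b t => simp at h; simp [h]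

-- A can never succeed once index 0 is unseen while p_idx is positive
theorem pvA_doomed (order : PySem.Dict String Int) (traj : List String) (pIdx : Int)
    (seen : List Bool) (h0 : seen[0]? = some false) (hp : 0 < pIdx) :
    pvA_loop order traj pIdx seen = false := by
  induction traj generalizing pIdx seen with
  | nil => rfl
  | cons c t ih =>
    rw [pvA_loop]
    cases hoc : PySem.Dict.get? order c with
    | none => exact pvAll_false seen h0
    | some idx =>
      simp only []
      by_cases h1 : idx < pIdx
      · rw [if_pos h1]
      · rw [if_neg h1]
        by_cases h2 : idx > pIdx ∧ idx ≠ pIdx + 1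
        · rw [if_pos h2]
        · rw [if_neg h2]
          have hz : seen.set idx.toNat true = (seen.set idx.toNat true) := rfl
          have h0' : (seen.set idx.toNat true)[0]? = some false := by
            rw [List.getElem?_set_ne (by omega)]
            exact h0
          rw [pvAll_false _ h0', if_neg (by simp)]
          split
          · exact ih idx (seen.set idx.toNat true) h0' (by omega)
          · exact ih pIdx (seen.set idx.toNat true) h0' hp

-- main invariant: after k matched runs (last run cell d), both loops agree
theorem pvMain (pattern : List String) (traj : List String) (k : Nat) (d : String)
    (hk1 : 1 ≤ k) (hkn : k < pattern.length)
    (hd : PySem.Dict.get? (pvOrder pattern) d = some ((k : Int) - 1)) :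
    pvA_loop (pvOrder pattern) traj ((k : Int) - 1) (pvSeenR pattern.length k)
      = pvB_loop (pvOrder pattern) (pattern.length : Int) traj (some d) (k : Int) := by
  induction traj generalizing k d with
  | nil => rfl
  | cons c t ih =>
    rw [pvA_loop, pvB_loop]
    by_cases hcd : d = c
    · subst hcd
      rw [if_pos rfl, hd]
      simp only []
      have ht : ((k : Int) - 1).toNat = k - 1 := by omega
      rw [if_neg (by omega), if_neg (by omega), ht,
          pvSeenR_set_lt _ _ _ (by omega), pvSeenR_all,
          decide_eq_false (by omega : ¬ pattern.length ≤ k), if_neg (by simp),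
          if_neg (by simp)]
      exact ih k d hk1 hkn hd
    · rw [if_neg (by simpa using hcd)]
      cases hoc : PySem.Dict.get? (pvOrder pattern) c with
      | none =>
        rw [PySem.Dict.getD_eq_get?_getD, hoc, Option.getD_none, if_pos (by omega),
            pvSeenR_all, decide_eq_false (by omega)]
      | some i =>
        rw [PySem.Dict.getD_eq_get?_getD, hoc, Option.getD_some]
        obtain ⟨j, hjn, rfl, hjc⟩ := pvOrder_char pattern c _ hoc
        simp only []
        by_cases hjk : j = k
        · subst hjk
          have ht : ((j : Nat) : Int).toNat = j := by omega
          rw [if_neg (by omega), if_neg (by omega), ht, pvSeenR_set_self, pvSeenR_all]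
          by_cases hn : (j : Int) + 1 = (pattern.length : Int)
          · rw [decide_eq_true (by omega : pattern.length ≤ j + 1), if_pos rfl,
                if_neg (by simp), if_pos hn]
          · rw [decide_eq_false (by omega : ¬ pattern.length ≤ j + 1), if_neg (by simp),
                if_pos (by omega : ((j : Nat) : Int) > (j : Int) - 1),
                if_neg (by simp), if_neg hn]
            have := ih (j + 1) c (by omega) (by omega)
              (by rw [hoc]; congr 1; push_cast; ring)
            push_cast at this
            simpa using this
        · rcases Nat.lt_trichotomy j (k - 1) with hlt | heq | hgt
          · rw [if_pos (by omega), if_pos (by omega : ((j : Nat) : Int) ≠ (k : Int))]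
          · exfalso
            obtain ⟨j', hj'n, hj'e, hj'c⟩ := pvOrder_char pattern d _ hd
            have : j' = j := by omega
            subst this
            rw [hjc] at hj'c
            exact hcd (by injection hj'c with h; exact h.symm)
          · rw [if_neg (by omega), if_pos (And.intro (by omega) (by omega)),
                if_pos (by omega : ((j : Nat) : Int) ≠ (k : Int))]

theorem pvStart (pattern : List String) (traj : List String) (hne : pattern ≠ []) :
    pvA_loop (pvOrder pattern) traj 0 (List.replicate pattern.length false)
      = pvB_loop (pvOrder pattern) (pattern.length : Int) traj none 0 := by
  have hn : 0 < pattern.length := List.length_pos_iff.mpr hne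
  cases traj with
  | nil => rfl
  | cons c t =>
    rw [pvA_loop, pvB_loop, if_neg (by simp)]
    cases hoc : PySem.Dict.get? (pvOrder pattern) c with
    | none =>
      rw [PySem.Dict.getD_eq_get?_getD, hoc, Option.getD_none, if_pos (by omega),
          pvSeenR_zero, pvSeenR_all, decide_eq_false (by omega)]
    | some i =>
      rw [PySem.Dict.getD_eq_get?_getD, hoc, Option.getD_some]
      obtain ⟨j, hjn, rfl, hjc⟩ := pvOrder_char pattern c _ hoc
      simp only []
      rcases Nat.lt_trichotomy j 1 with hj0 | hj1 | hj2
      · -- j = 0: advance within segment 0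
        have hj : j = 0 := by omega
        subst hj
        have ht : ((0 : Nat) : Int).toNat = 0 := by omega
        rw [if_neg (by omega), if_neg (by omega), ht, pvSeenR_zero,
            pvSeenR_set_self, pvSeenR_all]
        by_cases hn1 : (0 : Int) + 1 = (pattern.length : Int)
        · rw [decide_eq_true (by omega : pattern.length ≤ 0 + 1), if_pos rfl,
              if_neg (by simp), if_pos hn1]
        · rw [decide_eq_false (by omega : ¬ pattern.length ≤ 0 + 1), if_neg (by simp),
              if_neg (by omega : ¬ ((0 : Nat) : Int) > 0),
              if_neg (by simp), if_neg hn1]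
          have := pvMain pattern t 1 c (by omega) (by omega) (by rw [hoc]; congr 1)
          push_cast at this
          simpa using this
      · -- j = 1: A silently skips segment 0 and is doomed; B rejects at once
        subst hj1
        have ht : ((1 : Nat) : Int).toNat = 1 := by omega
        have h0' : ((List.replicate pattern.length false).set ((1 : Nat) : Int).toNat true)[0]? = some false := by
          rw [ht, List.getElem?_set_ne (by omega)]
          simp [List.getElem?_replicate]
          omega
        rw [if_neg (by omega), if_neg (by omega), pvAll_false _ h0', if_neg (by simp),
            if_pos (by omega : ((1 : Nat) : Int) > 0),
            if_pos (by omega : ((1 : Nat) : Int) ≠ 0)]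
        exact pvA_doomed _ t _ _ h0' (by omega)
      · -- j ≥ 2: both reject
        rw [if_neg (by omega), if_pos (And.intro (by omega) (by omega)),
            if_pos (by omega : ((j : Nat) : Int) ≠ 0)]

-- ===== VERDICT (by name: the statement is the Claim_ definition above) =====
theorem match_pattern_with_free_tail_spec : Claim_equal_match_pattern_with_free_tail := by
  intro traj pattern _
  unfold Spec_match_pattern_with_free_tail match_pattern_with_free_tail match_pattern_with_free_tail_alt
  by_cases h : pattern = []
  · simp [h]
  · simp only [h, if_false]
    exact pvStart pattern traj h
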